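-- pv_equiv track=rewrite | github.com/stefantaubert/pinyin-to-ipa | src/pinyin_to_ipa/ipa2symb.py | merge_left_core
-- ===== SOURCE A (Python) =====
-- from typing import Optional, Set, Tuple
--
-- def merge_left_core(symbols: Tuple[str, ...], merge_symbols: Set[str], ignore_merge_symbols: Set[str]) -> Tuple[Tuple[str, ...]]:
--   j = 0
--   reversed_symbols = symbols[::-1]
--   reversed_merged_symbols = []
--   while j < len(reversed_symbols):
--     new_symbol, j = get_next_merged_left_symbol_and_index(
--       reversed_symbols, j, merge_symbols, ignore_merge_symbols)
--     reversed_merged_symbols.append(new_symbol)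
--   merged_symbols = reversed_merged_symbols[::-1]
--   return tuple(merged_symbols)
--
-- def get_next_merged_left_symbol_and_index(symbols: Tuple[str, ...], j: int, merge_symbols: Set[str], ignore_merge_symbols: Set[str]) -> Tuple[str, int]:
--   new_symbol = [symbols[j]]
--   j += 1
--   if new_symbol[0] not in ignore_merge_symbols and new_symbol[0] not in merge_symbols:
--     while j < len(symbols) and symbols[j] in merge_symbols:
--       new_symbol.insert(0, symbols[j])
--       j += 1
--   return tuple(new_symbol), j
-- ===== SOURCE B (Python) =====
-- def merge_left_core(symbols, merge_symbols, ignore_merge_symbols):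
--   # Single forward pass: collect merge-marked symbols in `pending`; a core
--   # symbol absorbs them to its left, an ignore symbol (or end of input)
--   # flushes them as singletons.
--   out = []
--   pending = []
--   for s in symbols:
--     if s in merge_symbols:
--       pending.append(s)
--     elif s in ignore_merge_symbols:
--       out.extend((p,) for p in pending)
--       pending = []
--       out.append((s,))
--     else:
--       out.append(tuple(pending) + (s,))
--       pending = []
--   out.extend((p,) for p in pending)
--   return tuple(out)
-- ===== Notes on version B (the rewrite author's own statement) =====
-- stated objective: simpler
-- what changed: Replaces A's reverse-the-tuple, index-jumping two-level while-loop scan (with a helper returning (group, next_index)) by a single forward for-loop that keeps a pending list of merge symbols, absorbed by the next core symbol or flushed as singletons.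
import Mathlib
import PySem

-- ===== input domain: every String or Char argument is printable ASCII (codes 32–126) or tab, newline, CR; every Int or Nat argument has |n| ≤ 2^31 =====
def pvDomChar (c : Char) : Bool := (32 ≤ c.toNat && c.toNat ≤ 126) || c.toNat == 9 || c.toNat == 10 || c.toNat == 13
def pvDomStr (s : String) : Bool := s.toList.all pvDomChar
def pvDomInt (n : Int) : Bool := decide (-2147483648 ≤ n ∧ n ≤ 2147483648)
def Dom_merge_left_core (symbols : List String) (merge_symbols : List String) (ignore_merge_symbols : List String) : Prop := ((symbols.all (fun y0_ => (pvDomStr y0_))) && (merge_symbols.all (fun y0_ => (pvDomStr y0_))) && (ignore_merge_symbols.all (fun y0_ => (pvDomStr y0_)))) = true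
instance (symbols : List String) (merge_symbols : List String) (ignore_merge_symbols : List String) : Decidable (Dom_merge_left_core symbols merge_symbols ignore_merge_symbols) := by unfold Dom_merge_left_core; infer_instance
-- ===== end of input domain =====

-- B replaces A's reverse-and-scan-with-index-jumps by one forward pass keeping a
-- `pending` list of merge symbols (objective: simpler, same O(n) cost).

-- ===== PORT A =====
-- inner `while` of get_next_merged_left_symbol_and_index; `new_symbol.insert(0, symbols[j])`
-- is the cons onto acc. symbols[j] is guarded by j < len, so getD is exact here.
def pvInnerA (rs merge_symbols : List String) (j : Nat) (acc : List String) :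
    List String × Nat :=
  if h : j < rs.length ∧ merge_symbols.contains (rs.getD j "") then
    pvInnerA rs merge_symbols (j + 1) (rs.getD j "" :: acc)
  else (acc, j)
termination_by rs.length - j
decreasing_by omega

-- used by pvOuterA's termination proof
theorem pvInnerA_le (rs merge_symbols : List String) (j : Nat) (acc : List String) :
    j ≤ (pvInnerA rs merge_symbols j acc).2 := by
  unfold pvInnerA
  split
  · exact Nat.le_trans (Nat.le_succ j) (pvInnerA_le rs merge_symbols (j + 1) _)
  · exact Nat.le_refl j
termination_by rs.length - j
decreasing_by omega

-- get_next_merged_left_symbol_and_index (symbols[j] guarded by caller's j < len)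
def pvGetNextA (rs : List String) (j : Nat) (merge_symbols ignore_merge_symbols : List String) :
    List String × Nat :=
  -- new0 = symbols[j] (inlined; caller guarantees j < len, so getD is exact)
  if ¬ ignore_merge_symbols.contains (rs.getD j "") ∧ ¬ merge_symbols.contains (rs.getD j "") then
    pvInnerA rs merge_symbols (j + 1) [rs.getD j ""]
  else ([rs.getD j ""], j + 1)

theorem pvGetNextA_gt (rs : List String) (j : Nat) (ms ig : List String) :
    j < (pvGetNextA rs j ms ig).2 := by
  unfold pvGetNextA
  split
  · exact Nat.lt_of_lt_of_le (Nat.lt_succ_self j) (pvInnerA_le rs ms (j + 1) _)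
  · exact Nat.lt_succ_self j

-- the outer `while j < len(reversed_symbols)` loop, accumulating reversed_merged_symbols
def pvOuterA (rs merge_symbols ignore_merge_symbols : List String) (j : Nat)
    (acc : List (List String)) : List (List String) :=
  if h : j < rs.length then
    let r := pvGetNextA rs j merge_symbols ignore_merge_symbols
    pvOuterA rs merge_symbols ignore_merge_symbols r.2 (acc ++ [r.1])
  else acc
termination_by rs.length - j
decreasing_by exact Nat.sub_lt_sub_left h (pvGetNextA_gt rs j merge_symbols ignore_merge_symbols)

-- symbols[::-1] and the final reversed_merged_symbols[::-1] are List.reverse (exact)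
def merge_left_core (symbols : List String) (merge_symbols : List String)
    (ignore_merge_symbols : List String) : List (List String) :=
  (pvOuterA symbols.reverse merge_symbols ignore_merge_symbols 0 []).reverse

-- ===== PORT B =====
-- one step of Source B's for-loop over (out, pending)
def pvStepB (merge_symbols ignore_merge_symbols : List String)
    (st : List (List String) × List String) (s : String) : List (List String) × List String :=
  if merge_symbols.contains s then (st.1, st.2 ++ [s])
  else if ignore_merge_symbols.contains s then
    (st.1 ++ st.2.map (fun p => [p]) ++ [[s]], [])
  else (st.1 ++ [st.2 ++ [s]], [])

def merge_left_core_alt (symbols : List String) (merge_symbols : List String)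
    (ignore_merge_symbols : List String) : List (List String) :=
  let st := symbols.foldl (pvStepB merge_symbols ignore_merge_symbols) ([], [])
  st.1 ++ st.2.map (fun p => [p])

-- ===== PRECONDITION & SPEC =====
def Spec_merge_left_core (symbols : List String) (merge_symbols : List String) (ignore_merge_symbols : List String) (out : List (List String)) : Prop := out = merge_left_core_alt symbols merge_symbols ignore_merge_symbols
instance (symbols : List String) (merge_symbols : List String) (ignore_merge_symbols : List String) (out : List (List String)) : Decidable (Spec_merge_left_core symbols merge_symbols ignore_merge_symbols out) := by unfold Spec_merge_left_core; infer_instance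

-- ===== CLAIM (what is proved, stated in full; the proofs are below) =====
def Claim_equal_merge_left_core : Prop := ∀ (symbols : List String) (merge_symbols : List String) (ignore_merge_symbols : List String), Dom_merge_left_core symbols merge_symbols ignore_merge_symbols → Spec_merge_left_core symbols merge_symbols ignore_merge_symbols (merge_left_core symbols merge_symbols ignore_merge_symbols)

-- ===== LEMMAS AND PROOFS =====

-- Mid-level description of A's scan of the reversed list: a core symbol swallows the
-- following run of merge symbols, anything else is a singleton.
def pvARun (ms ig : List String) : List String → List (List String)
  | [] => []
  | y :: t =>
    if ¬ ig.contains y ∧ ¬ ms.contains y then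
      ((t.takeWhile (fun x => ms.contains x)).reverse ++ [y])
        :: pvARun ms ig (t.dropWhile (fun x => ms.contains x))
    else [y] :: pvARun ms ig t
termination_by l => l.length
decreasing_by
  · exact Nat.lt_succ_of_le (t.length_dropWhile_le _)
  · exact Nat.lt_succ_self _

theorem pvDropWhile_head_not (p : String → Bool) : ∀ (l : List String) (r0 : String)
    (r' : List String), l.dropWhile p = r0 :: r' → p r0 = false := by
  intro l
  induction l with
  | nil => intro r0 r' h; simp [List.dropWhile] at h
  | cons x xs ih =>
    intro r0 r' h
    by_cases hp : p x = true
    · rw [List.dropWhile_cons_of_pos hp] at h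
      exact ih r0 r' h
    · rw [List.dropWhile_cons_of_neg hp] at h
      cases h
      exact Bool.not_eq_true _ |>.mp hp

theorem pvInnerA_eq (ms : List String) : ∀ (rs : List String) (j : Nat) (acc : List String),
    pvInnerA rs ms j acc =
      (((rs.drop j).takeWhile (fun x => ms.contains x)).reverse ++ acc,
        j + ((rs.drop j).takeWhile (fun x => ms.contains x)).length) := by
  intro rs j acc
  unfold pvInnerA
  split
  · rename_i h
    obtain ⟨hj, hc⟩ := h
    rw [pvInnerA_eq ms rs (j + 1) _]
    have hd : rs.drop j = rs.getD j "" :: rs.drop (j + 1) := by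
      rw [List.getD_eq_getElem rs "" hj]
      exact (List.getElem_cons_drop hj).symm
    rw [hd, List.takeWhile_cons_of_pos (p := fun x => ms.contains x) hc]
    refine Prod.ext ?_ ?_
    · simp only [List.reverse_cons, List.append_assoc, List.singleton_append]
    · simp only [List.length_cons]
      omega
  · rename_i h
    by_cases hj : j < rs.length
    · have hc : ms.contains (rs.getD j "") = false := by
        cases hcc : ms.contains (rs.getD j "") with
        | false => rfl
        | true => exact absurd ⟨hj, hcc⟩ h
      have hd : rs.drop j = rs.getD j "" :: rs.drop (j + 1) := by
        rw [List.getD_eq_getElem rs "" hj]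
        exact (List.getElem_cons_drop hj).symm
      rw [hd, List.takeWhile_cons_of_neg (p := fun x => ms.contains x) (by simp [List.getD] at hc ⊢; exact hc)]
      simp
    · have hde : rs.drop j = [] := List.drop_eq_nil_of_le (Nat.le_of_not_lt hj)
      rw [hde]
      simp
termination_by rs j acc => rs.length - j
decreasing_by omega

theorem pvDrop_takeWhile (p : String → Bool) (l : List String) :
    l.drop ((l.takeWhile p).length) = l.dropWhile p := by
  induction l with
  | nil => simp
  | cons x xs ih =>
    by_cases hp : p x = true
    · rw [List.takeWhile_cons_of_pos hp, List.dropWhile_cons_of_pos hp, List.length_cons,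
          List.drop_succ_cons, ih]
    · rw [List.takeWhile_cons_of_neg hp, List.dropWhile_cons_of_neg hp]
      simp

theorem pvOuterA_eq (ms ig : List String) : ∀ (rs : List String) (j : Nat)
    (acc : List (List String)),
    pvOuterA rs ms ig j acc = acc ++ pvARun ms ig (rs.drop j) := by
  intro rs j acc
  unfold pvOuterA
  split
  · rename_i hj
    have hd : rs.drop j = rs.getD j "" :: rs.drop (j + 1) := by
      rw [List.getD_eq_getElem rs "" hj]
      exact (List.getElem_cons_drop hj).symm
    rw [pvOuterA_eq ms ig rs _ _]
    unfold pvGetNextA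
    split
    · rename_i hcore
      rw [pvInnerA_eq]
      have hdw : rs.drop (j + 1 + ((rs.drop (j + 1)).takeWhile (fun x => ms.contains x)).length)
          = (rs.drop (j + 1)).dropWhile (fun x => ms.contains x) := by
        rw [← pvDrop_takeWhile (fun x => ms.contains x) (rs.drop (j + 1)), List.drop_drop]
      rw [hd, pvARun, if_pos hcore]
      rw [hdw]
      simp
    · rename_i hncore
      rw [hd, pvARun, if_neg hncore]
      simp
  · rename_i hj
    have hde : rs.drop j = [] := List.drop_eq_nil_of_le (Nat.le_of_not_lt hj)
    rw [hde, pvARun]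
    simp
termination_by rs j acc => rs.length - j
decreasing_by exact Nat.sub_lt_sub_left ‹j < rs.length› (pvGetNextA_gt rs j ms ig)

-- B-side facts about the foldl

theorem pvFoldB_allmerge (ms ig : List String) : ∀ (v : List String)
    (st : List (List String) × List String), (∀ x ∈ v, ms.contains x = true) →
    v.foldl (pvStepB ms ig) st = (st.1, st.2 ++ v) := by
  intro v
  induction v with
  | nil => intro st _; simp
  | cons s t ih =>
    intro st hall
    simp only [List.foldl_cons]
    rw [show pvStepB ms ig st s = (st.1, st.2 ++ [s]) from by
      unfold pvStepB; rw [if_pos (hall s (by simp))]]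
    rw [ih _ (fun x hx => hall x (by simp [hx]))]
    simp

-- after processing (the reverse of) a dropWhile result, the pending list is empty
theorem pvFoldB_pend_nil (ms ig : List String) (l : List String) :
    ((l.dropWhile (fun x => ms.contains x)).reverse.foldl (pvStepB ms ig) ([], [])).2 = [] := by
  cases hr : l.dropWhile (fun x => ms.contains x) with
  | nil => simp
  | cons r0 r' =>
    have h0 : ms.contains r0 = false := pvDropWhile_head_not _ l r0 r' hr
    rw [List.reverse_cons, List.foldl_append]
    simp only [List.foldl_cons, List.foldl_nil]
    unfold pvStepB
    rw [if_neg (by rw [h0]; simp)]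
    split <;> simp

-- main bridge: A's reversed-scan groups, re-reversed, are B's forward fold
theorem pvMain (ms ig : List String) : ∀ (n : Nat) (rs : List String), rs.length ≤ n →
    (pvARun ms ig rs).reverse = merge_left_core_alt rs.reverse ms ig := by
  intro n
  induction n with
  | zero =>
    intro rs h
    rw [List.length_eq_zero_iff.mp (Nat.le_zero.mp h), pvARun]
    simp [merge_left_core_alt]
  | succ n ih =>
    intro rs h
    cases rs with
    | nil =>
      rw [pvARun]; simp [merge_left_core_alt]
    | cons y t =>
      rw [pvARun]
      by_cases hcore : ¬ ig.contains y = true ∧ ¬ ms.contains y = true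
      · rw [if_pos hcore]
        set w := t.takeWhile (fun x => ms.contains x) with hw
        set r := t.dropWhile (fun x => ms.contains x) with hrr
        have ht : t = w ++ r := (List.takeWhile_append_dropWhile).symm
        have hrlen : r.length ≤ n := by
          have h1 : r.length ≤ t.length := by rw [hrr]; exact t.length_dropWhile_le _
          simp at h
          omega
        have ihr := ih r hrlen
        simp only [merge_left_core_alt] at ihr ⊢
        have hp : (r.reverse.foldl (pvStepB ms ig) ([], [])).2 = [] := by
          rw [hrr]; exact pvFoldB_pend_nil ms ig t
        have hfr : r.reverse.foldl (pvStepB ms ig) ([], [])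
            = ((r.reverse.foldl (pvStepB ms ig) ([], [])).1, []) :=
          Prod.ext rfl hp
        set a := (r.reverse.foldl (pvStepB ms ig) ([], [])).1 with ha
        have hwall : ∀ x ∈ w.reverse, ms.contains x = true := by
          intro x hx
          rw [List.mem_reverse, hw] at hx
          exact List.mem_takeWhile_imp hx
        have key : (y :: t).reverse = (r.reverse ++ w.reverse) ++ [y] := by
          rw [ht]; simp
        have hstep : pvStepB ms ig (a, w.reverse) y = (a ++ [w.reverse ++ [y]], []) := by
          unfold pvStepB; rw [if_neg hcore.2, if_neg hcore.1]
        have hfold : (y :: t).reverse.foldl (pvStepB ms ig) ([], [])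
            = (a ++ [w.reverse ++ [y]], []) := by
          rw [key, List.foldl_append, List.foldl_append, hfr,
              pvFoldB_allmerge ms ig w.reverse (a, []) hwall]
          simp only [List.foldl_cons, List.foldl_nil, List.nil_append]
          exact hstep
        rw [hfold]
        have hav : (pvARun ms ig r).reverse = a := by
          rw [hfr] at ihr
          simpa using ihr
        rw [List.reverse_cons, hav]
        simp
      · rw [if_neg hcore]
        have htlen : t.length ≤ n := by simp at h; omega
        have iht := ih t htlen
        simp only [merge_left_core_alt] at iht ⊢
        have hfold : (y :: t).reverse.foldl (pvStepB ms ig) ([], [])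
            = pvStepB ms ig (t.reverse.foldl (pvStepB ms ig) ([], [])) y := by
          rw [List.reverse_cons, List.foldl_append]
          simp
        set st := t.reverse.foldl (pvStepB ms ig) ([], []) with hst
        rw [hfold]
        by_cases hm : ms.contains y = true
        · rw [show pvStepB ms ig st y = (st.1, st.2 ++ [y]) from by
            unfold pvStepB; rw [if_pos hm]]
          rw [List.reverse_cons, iht]
          simp
        · have hi : ig.contains y = true := by
            by_contra hni
            exact hcore ⟨hni, hm⟩
          rw [show pvStepB ms ig st y = (st.1 ++ st.2.map (fun p => [p]) ++ [[y]], []) from by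
            unfold pvStepB; rw [if_neg hm, if_pos hi]]
          rw [List.reverse_cons, iht]
          simp

-- ===== VERDICT (by name: the statement is the Claim_ definition above) =====
theorem merge_left_core_spec : Claim_equal_merge_left_core := by
  intro symbols ms ig _
  unfold Spec_merge_left_core merge_left_core
  rw [pvOuterA_eq ms ig symbols.reverse 0 []]
  simp only [List.drop_zero, List.nil_append]
  rw [pvMain ms ig symbols.reverse.length symbols.reverse (Nat.le_refl _)]
  rw [List.reverse_reverse]
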